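-- pv_equiv track=rewrite | github.com/JGW-JGW/LeetCodeLearning | 2122. 还原原数组.py | recoverArray
-- ===== SOURCE A (Python) =====
-- from typing import List, Dict
--
-- def recoverArray(nums: List[int]) -> List[int]:
--     nums.sort()
--     i, n = 1, len(nums)
--
--     while True:
--         if nums[i] == nums[i - 1]:
--             i += 1
--             continue
--
--         diff = nums[i] - nums[0]
--
--         if diff & 1 > 0:
--             i += 1
--             continue
--
--         # 记录 nums 中属于 higher 的数的位置
--         in_higher = [False] * n
--
--         # 一开始就是验证 nums[i] 作为 higher[0] 的可行性，所以需要添加 i 到 in_higher 中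
--         in_higher[i] = True
--
--         k = diff >> 1
--
--         result = [nums[0] + k]
--
--         lo, hi = 1, i + 1
--
--         while hi < n:
--             # 当 lo 在 n 范围内且lo位置已经被添加到 higher 中
--             while lo < n and in_higher[lo]:
--                 lo += 1
--
--             # 当找到了一个 lo 之后，寻找匹配的 hi。只要差值比 diff 小，就继续看下一个
--             while hi < n and nums[hi] - nums[lo] < diff:
--                 hi += 1
--
--             # 如果 hi 到达 n，说明没找到合适的 hi；或者没找到差值正好等于 diff 的 hi，则退出循环
--             if hi == n or nums[hi] - nums[lo] > diff:
--                 break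
--
--             # 恰好找到了合适的 hi
--             in_higher[hi] = True
--
--             result.append(nums[lo] + k)
--
--             lo += 1
--             hi += 1
--
--         if len(result) == n >> 1:
--             return result
--
--         i += 1
-- ===== SOURCE B (Python) =====
-- def recoverArray(nums):
--     # Same return values as the two-pointer/mask original; matcher works on an
--     # explicit remaining multiset (sorted list) instead of a boolean mask with
--     # two pointers.  Sorts nums in place, like the original.
--     nums.sort()
--     n = len(nums)
--     for i in range(1, n):
--         if nums[i] == nums[i - 1]:
--             continue
--         diff = nums[i] - nums[0]
--         if diff % 2:
--             continue
--         k = diff // 2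
--         res = []
--         rem = nums[:]
--         while len(rem) > 1:
--             x = rem.pop(0)
--             if x + diff in rem:
--                 rem.remove(x + diff)
--                 res.append(x + k)
--             else:
--                 break
--         if len(res) == n // 2:
--             return res
--     raise ValueError("no valid original array")
-- ===== Notes on version B (the rewrite author's own statement) =====
-- stated objective: simpler
-- what changed: Per candidate difference, A's boolean in_higher mask with two moving pointers (lo, hi) over the sorted array is replaced by an explicit remaining multiset: pop the smallest remaining value and remove its value+diff partner from the remaining list, stopping at the first missing partner.
import Mathlib
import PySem

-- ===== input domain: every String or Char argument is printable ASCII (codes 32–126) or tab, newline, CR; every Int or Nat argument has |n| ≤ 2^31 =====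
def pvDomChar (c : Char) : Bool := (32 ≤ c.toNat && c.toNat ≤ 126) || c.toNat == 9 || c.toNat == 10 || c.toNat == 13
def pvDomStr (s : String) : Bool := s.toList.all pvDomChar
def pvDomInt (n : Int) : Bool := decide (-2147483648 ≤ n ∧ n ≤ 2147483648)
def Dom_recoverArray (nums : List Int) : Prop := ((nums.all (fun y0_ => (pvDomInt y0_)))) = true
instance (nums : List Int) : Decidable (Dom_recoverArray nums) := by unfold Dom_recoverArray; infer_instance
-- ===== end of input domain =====

-- B replaces A's boolean mask with two moving pointers by an explicit remaining
-- multiset (a sorted list that is consumed); same return values, plainer loop.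
-- Both A and B sort `nums` in place before working; the equivalence proved here
-- is about the RETURN value (the in-place sort side effect is identical anyway).

-- ===== PORT A =====
-- Every Python `while` below is ported as primitive recursion on an explicit
-- fuel counter; each loop advances its index by ≥ 1 per iteration towards n,
-- so fuel n is an upper bound on the trip count and never binds: the ports
-- compute exactly what the Python loops compute.

-- `while lo < n and in_higher[lo]: lo += 1`
def pvSkipLo (mask : List Bool) (n : Nat) : Nat → Nat → Nat
  | 0, lo => lo
  | fuel + 1, lo =>
    if lo < n ∧ mask.getD lo false then pvSkipLo mask n fuel (lo + 1) else lo

-- `while hi < n and nums[hi] - nums[lo] < diff: hi += 1`  (x = nums[lo])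
def pvAdvHi (s : List Int) (diff x : Int) (n : Nat) : Nat → Nat → Nat
  | 0, hi => hi
  | fuel + 1, hi =>
    if hi < n ∧ s.getD hi 0 - x < diff then pvAdvHi s diff x n fuel (hi + 1) else hi

-- A's inner `while hi < n: …` loop (mask = in_higher; list reads via getD are
-- in range on reachable states, see the invariants in main_eq below)
def pvMainLoop (s : List Int) (diff k : Int) (n : Nat) :
    Nat → List Bool → Nat → Nat → List Int → List Int
  | 0, _, _, _, result => result
  | fuel + 1, mask, lo, hi, result =>
    if hi < n then
      let lo' := pvSkipLo mask n n lo
      let hi' := pvAdvHi s diff (s.getD lo' 0) n n hi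
      if hi' = n ∨ s.getD hi' 0 - s.getD lo' 0 > diff then result
      else pvMainLoop s diff k n fuel (mask.set hi' true) (lo' + 1) (hi' + 1)
             (result ++ [s.getD lo' 0 + k])
    else result

-- A's outer `while True` over candidate i; Python raises IndexError at i = n,
-- the port returns [] there (excluded by Pre_recoverArray)
def pvLoopA (s : List Int) (n : Nat) : Nat → Nat → List Int
  | 0, _ => []
  | fuel + 1, i =>
    if i < n then
      if s.getD i 0 = s.getD (i - 1) 0 then pvLoopA s n fuel (i + 1)
      else
        let diff := s.getD i 0 - s.getD 0 0
        if 0 < PySem.Int.band diff 1 then pvLoopA s n fuel (i + 1)   -- `diff & 1 > 0`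
        else
          let k := diff >>> (1 : Nat)                                -- `diff >> 1`
          let mask := (List.replicate n false).set i true
          let res := pvMainLoop s diff k n n mask 1 (i + 1) [s.getD 0 0 + k]
          if res.length = n / 2 then res                             -- `len(result) == n >> 1`
          else pvLoopA s n fuel (i + 1)
    else []

def recoverArray (nums : List Int) : List Int :=
  let s := PySem.List.sorted nums (fun x => x) false                 -- nums.sort()
  pvLoopA s s.length s.length 1

-- ===== PORT B =====

-- B's matcher: `while len(rem) > 1: x = rem.pop(0);
--   if x+diff in rem: rem.remove(x+diff); res.append(x+k) else: break`
-- (fuel n again: each iteration removes two elements of rem)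
def pvGreedyB (diff k : Int) : Nat → List Int → List Int → List Int
  | 0, _, res => res
  | fuel + 1, rem, res =>
    if 1 < rem.length then
      match rem with
      | [] => res
      | x :: rest =>
        match PySem.List.remove? rest (x + diff) with
        | some rest' => pvGreedyB diff k fuel rest' (res ++ [x + k])
        | none => res
    else res

-- B's `for i in range(1, n)` over candidates; Python raises ValueError after
-- the loop, the port returns [] there (excluded by Pre_recoverArray)
def pvLoopB (s : List Int) (n : Nat) : Nat → Nat → List Int
  | 0, _ => []
  | fuel + 1, i =>
    if i < n then
      if s.getD i 0 = s.getD (i - 1) 0 then pvLoopB s n fuel (i + 1)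
      else
        let diff := s.getD i 0 - s.getD 0 0
        if PySem.Int.mod diff 2 ≠ 0 then pvLoopB s n fuel (i + 1)    -- `diff % 2`
        else
          let k := PySem.Int.floordiv diff 2                         -- `diff // 2`
          let res := pvGreedyB diff k n s []
          if res.length = n / 2 then res else pvLoopB s n fuel (i + 1)
    else []

def recoverArray_alt (nums : List Int) : List Int :=
  let s := PySem.List.sorted nums (fun x => x) false                 -- nums.sort()
  pvLoopB s s.length s.length 1

-- ===== PRECONDITION & SPEC =====

-- helper for Pre_: number of (lower, lower+d) pairs the smallest-first pairing
-- of the sorted list forms before it fails.  A raises exactly when no candidate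
-- succeeds; that success condition is the defining property of the input (it IS
-- what the function's domain means) and has no quantifier-free closed form, so
-- Pre_ states it through this primitive-recursive pair count (independent of
-- both ports; the structural fuel is an upper bound on the pair count, n)
def pvPairCount (d : Int) : Nat → List Int → Nat
  | 0, _ => 0
  | fuel + 1, rem =>
    if 1 < rem.length then
      match rem with
      | [] => 0
      | x :: rest =>
        match PySem.List.remove? rest (x + d) with
        | some rest' => pvPairCount d fuel rest' + 1
        | none => 0
    else 0

-- Pre_ excludes exactly the inputs on which A raises (IndexError when every
-- candidate difference fails): A returns normally iff, after sorting, some index i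
-- starts a new value whose even distance to the minimum admits a smallest-first
-- pairing of n/2 pairs.
def Pre_recoverArray (nums : List Int) : Prop :=
  ∃ i < (PySem.List.sorted nums (fun x => x) false).length, 1 ≤ i ∧
    (PySem.List.sorted nums (fun x => x) false).getD i 0 ≠
      (PySem.List.sorted nums (fun x => x) false).getD (i - 1) 0 ∧
    PySem.Int.mod ((PySem.List.sorted nums (fun x => x) false).getD i 0 -
      (PySem.List.sorted nums (fun x => x) false).getD 0 0) 2 = 0 ∧
    pvPairCount ((PySem.List.sorted nums (fun x => x) false).getD i 0 -
        (PySem.List.sorted nums (fun x => x) false).getD 0 0)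
      (PySem.List.sorted nums (fun x => x) false).length
      (PySem.List.sorted nums (fun x => x) false) =
      (PySem.List.sorted nums (fun x => x) false).length / 2
instance (nums : List Int) : Decidable (Pre_recoverArray nums) := by
  unfold Pre_recoverArray; infer_instance

def pvWitness_recoverArray : List Int := [2, 6]

def Spec_recoverArray (nums : List Int) (out : List Int) : Prop := out = recoverArray_alt nums
instance (nums : List Int) (out : List Int) : Decidable (Spec_recoverArray nums out) := by
  unfold Spec_recoverArray; infer_instance

-- ===== CLAIM (what is proved, stated in full; the proofs are below) =====
def Claim_equal_recoverArray : Prop := ∀ (nums : List Int), Dom_recoverArray nums →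
  Pre_recoverArray nums → Spec_recoverArray nums (recoverArray nums)

-- ===== LEMMAS AND PROOFS =====

-- remaining multiset of B's matcher, read off A's state: values at unmarked indices ≥ lo
def remOf (s : List Int) (mask : List Bool) (lo : Nat) : List Int :=
  if lo < s.length then
    (if mask.getD lo false then remOf s mask (lo + 1)
     else s.getD lo 0 :: remOf s mask (lo + 1))
  else []
termination_by s.length - lo

theorem remOf_nil (s : List Int) (mask : List Bool) (lo : Nat) (h : ¬ lo < s.length) :
    remOf s mask lo = [] := by
  rw [remOf, if_neg h]

theorem remOf_marked (s : List Int) (mask : List Bool) (lo : Nat)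
    (h : lo < s.length) (hm : mask.getD lo false = true) :
    remOf s mask lo = remOf s mask (lo + 1) := by
  conv_lhs => rw [remOf]
  rw [if_pos h, hm]
  simp

theorem remOf_unmarked (s : List Int) (mask : List Bool) (lo : Nat)
    (h : lo < s.length) (hm : mask.getD lo false = false) :
    remOf s mask lo = s.getD lo 0 :: remOf s mask (lo + 1) := by
  conv_lhs => rw [remOf]
  rw [if_pos h, hm]
  simp

theorem not_mem_remOf (s : List Int) (mask : List Bool) (lo : Nat) (v : Int)
    (h : ∀ j, lo ≤ j → j < s.length → mask.getD j false = false → s.getD j 0 ≠ v) :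
    v ∉ remOf s mask lo := by
  fun_induction remOf s mask lo with
  | case1 lo hlt hm ih => exact ih (fun j hj => h j (by omega))
  | case2 lo hlt hm ih =>
    simp only [List.mem_cons, not_or]
    exact ⟨fun he => h lo le_rfl hlt (by simpa using hm) he.symm,
           ih (fun j hj => h j (by omega))⟩
  | case3 lo h => simp

theorem remOf_head (s : List Int) (mask : List Bool) (lo : Nat) (x : Int) (rest : List Int)
    (h : remOf s mask lo = x :: rest) :
    ∃ t, lo ≤ t ∧ t < s.length ∧ mask.getD t false = false ∧ x = s.getD t 0 ∧
      (∀ j, lo ≤ j → j < t → mask.getD j false = true) ∧ rest = remOf s mask (t + 1) := by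
  fun_induction remOf s mask lo with
  | case1 lo hlt hm ih =>
    obtain ⟨t, ht1, ht2, ht3, ht4, ht5, ht6⟩ := ih h
    refine ⟨t, by omega, ht2, ht3, ht4, ?_, ht6⟩
    intro j hj1 hj2
    rcases Nat.eq_or_lt_of_le hj1 with he | he
    · subst he; simpa using hm
    · exact ht5 j (by omega) hj2
  | case2 lo hlt hm ih =>
    cases h
    exact ⟨lo, le_rfl, hlt, by simpa using hm, rfl, fun j h1 h2 => by omega, rfl⟩
  | case3 lo h2 => cases h

theorem getD_set_ne' (mask : List Bool) (t j : Nat) (b : Bool) (h : j ≠ t) :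
    (mask.set t b).getD j false = mask.getD j false := by
  simp only [List.getD_eq_getElem?_getD]
  rw [List.getElem?_set_ne (by omega)]

theorem getD_set_self' (mask : List Bool) (t : Nat) (h : t < mask.length) :
    (mask.set t true).getD t false = true := by
  simp [List.getD_eq_getElem?_getD, h]

theorem remOf_set_lt (s : List Int) (mask : List Bool) (t : Nat) (b : Bool) (lo : Nat)
    (h : t < lo) : remOf s (mask.set t b) lo = remOf s mask lo := by
  fun_induction remOf s (mask.set t b) lo with
  | case1 lo hlt hm ih =>
    have hg : mask.getD lo false = true := by
      rw [← getD_set_ne' mask t lo b (by omega)]; simpa using hm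
    rw [remOf_marked s mask lo hlt hg]
    exact ih (by omega)
  | case2 lo hlt hm ih =>
    have hg : mask.getD lo false = false := by
      rw [← getD_set_ne' mask t lo b (by omega)]; simpa using hm
    rw [remOf_unmarked s mask lo hlt hg]
    rw [ih (by omega)]
  | case3 lo hge => rw [remOf_nil s mask lo hge]

theorem remOf_skip (s : List Int) (mask : List Bool) :
    ∀ (d lo b : Nat), b - lo = d → lo ≤ b →
      (∀ j, lo ≤ j → j < b → mask.getD j false = true) →
      remOf s mask lo = remOf s mask b := by
  intro d
  induction d with
  | zero => intro lo b h1 h2 _; have : lo = b := by omega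
            rw [this]
  | succ d ih =>
    intro lo b h1 h2 hmk
    have hlo : lo < b := by omega
    have h3 : mask.getD lo false = true := hmk lo le_rfl hlo
    by_cases hlt : lo < s.length
    · rw [remOf_marked s mask lo hlt h3]
      exact ih (lo + 1) b (by omega) (by omega) (fun j hj => hmk j (by omega))
    · rw [remOf_nil s mask lo hlt, remOf_nil s mask b (by omega)]

theorem remove_remOf (s : List Int) (mask : List Bool) :
    ∀ (d a t : Nat), t - a = d → a ≤ t → t < s.length → mask.length = s.length →
      mask.getD t false = false →
      (∀ j, a ≤ j → j < t → mask.getD j false = false → s.getD j 0 ≠ s.getD t 0) →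
      PySem.List.remove? (remOf s mask a) (s.getD t 0) = some (remOf s (mask.set t true) a) := by
  intro d
  induction d with
  | zero =>
    intro a t h1 h2 hlen hml hmt _
    have hat : a = t := by omega
    subst hat
    rw [remOf_unmarked s mask a hlen hmt, PySem.List.remove?_cons_self,
        remOf_marked s (mask.set a true) a hlen (getD_set_self' mask a (by omega)),
        remOf_set_lt s mask a true (a + 1) (by omega)]
  | succ d ih =>
    intro a t h1 h2 hlen hml hmt hne
    have hat : a < t := by omega
    have haL : a < s.length := by omega
    by_cases hma : mask.getD a false = true
    · rw [remOf_marked s mask a haL hma]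
      have hma' : (mask.set t true).getD a false = true := by
        rw [getD_set_ne' mask t a true (by omega)]; exact hma
      rw [remOf_marked s (mask.set t true) a haL hma']
      exact ih (a + 1) t (by omega) (by omega) hlen hml hmt (fun j hj => hne j (by omega))
    · have hma0 : mask.getD a false = false := by simpa using hma
      rw [remOf_unmarked s mask a haL hma0]
      have hma' : (mask.set t true).getD a false = false := by
        rw [getD_set_ne' mask t a true (by omega)]; exact hma0
      rw [remOf_unmarked s (mask.set t true) a haL hma']
      rw [PySem.List.remove?_cons_of_ne _ (hne a le_rfl hat hma0)]
      rw [ih (a + 1) t (by omega) (by omega) hlen hml hmt (fun j hj => hne j (by omega))]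
      rfl

theorem pvRemoveLen {xs ys : List Int} {v : Int}
    (h : PySem.List.remove? xs v = some ys) : ys.length + 1 = xs.length := by
  have hv : v ∈ xs := by
    by_contra hv
    rw [(PySem.List.remove?_eq_none_iff xs v).mpr hv] at h
    cases h
  rw [PySem.List.remove?_eq_some_erase xs v hv] at h
  have h2 := List.length_erase_of_mem hv
  have h3 : 0 < xs.length := List.length_pos_of_mem hv
  cases h
  omega

theorem remOf_length_le (s : List Int) (mask : List Bool) (lo : Nat) :
    (remOf s mask lo).length ≤ s.length - lo := by
  fun_induction remOf s mask lo with
  | case1 lo hlt hm ih => omega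
  | case2 lo hlt hm ih => simp only [List.length_cons]; omega
  | case3 lo h => simp

theorem greedyB_small (diff k : Int) (fuel : Nat) (rem res : List Int)
    (h : ¬ 1 < rem.length) : pvGreedyB diff k fuel rem res = res := by
  cases fuel with
  | zero => rfl
  | succ fuel =>
    simp only [pvGreedyB]
    rw [if_neg h]

theorem greedyB_stop (diff k x : Int) (fuel : Nat) (rest res : List Int)
    (h : x + diff ∉ rest) : pvGreedyB diff k fuel (x :: rest) res = res := by
  have h0 : PySem.List.remove? rest (x + diff) = none :=
    (PySem.List.remove?_eq_none_iff _ _).mpr h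
  cases fuel with
  | zero => rfl
  | succ fuel =>
    simp only [pvGreedyB]
    by_cases h1 : 1 < (x :: rest).length
    · rw [if_pos h1]
      split
      · rename_i rest' heq
        rw [h0] at heq; cases heq
      · rfl
    · rw [if_neg h1]

theorem greedyB_step (diff k x : Int) (fuel : Nat) (rest rest' res : List Int)
    (hrm : PySem.List.remove? rest (x + diff) = some rest') :
    pvGreedyB diff k (fuel + 1) (x :: rest) res = pvGreedyB diff k fuel rest' (res ++ [x + k]) := by
  have hne : rest ≠ [] := by
    intro he
    rw [he, (PySem.List.remove?_eq_none_iff ([] : List Int) (x + diff)).mpr (by simp)] at hrm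
    cases hrm
  have hlen : 1 < (x :: rest).length := by
    have := List.length_pos_iff.mpr hne
    simp only [List.length_cons]
    omega
  simp only [pvGreedyB]
  rw [if_pos hlen]
  split
  · rename_i r' heq
    rw [hrm] at heq; cases heq; rfl
  · rename_i heq
    rw [hrm] at heq; cases heq

theorem pvSkipLo_spec (mask : List Bool) (n : Nat) :
    ∀ (fuel lo : Nat), n ≤ lo + fuel →
      lo ≤ pvSkipLo mask n fuel lo ∧
      (∀ j, lo ≤ j → j < pvSkipLo mask n fuel lo → j < n ∧ mask.getD j false = true) ∧
      ¬(pvSkipLo mask n fuel lo < n ∧ mask.getD (pvSkipLo mask n fuel lo) false = true) := by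
  intro fuel
  induction fuel with
  | zero =>
    intro lo hfa
    simp only [pvSkipLo]
    exact ⟨le_rfl, fun j h1 h2 => by omega, fun hc => absurd hc.1 (by omega)⟩
  | succ fuel ih =>
    intro lo hfa
    simp only [pvSkipLo]
    by_cases hc : lo < n ∧ mask.getD lo false = true
    · rw [if_pos hc]
      obtain ⟨ih1, ih2, ih3⟩ := ih (lo + 1) (by omega)
      refine ⟨by omega, ?_, ih3⟩
      intro j hj1 hj2
      rcases Nat.eq_or_lt_of_le hj1 with he | he
      · subst he; exact hc
      · exact ih2 j (by omega) hj2
    · rw [if_neg hc]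
      exact ⟨le_rfl, fun j h1 h2 => by omega, hc⟩

theorem pvAdvHi_spec (s : List Int) (diff x : Int) (n : Nat) :
    ∀ (fuel hi : Nat), n ≤ hi + fuel →
      hi ≤ pvAdvHi s diff x n fuel hi ∧
      (hi ≤ n → pvAdvHi s diff x n fuel hi ≤ n) ∧
      (∀ j, hi ≤ j → j < pvAdvHi s diff x n fuel hi → s.getD j 0 - x < diff) ∧
      (pvAdvHi s diff x n fuel hi < n → ¬(s.getD (pvAdvHi s diff x n fuel hi) 0 - x < diff)) := by
  intro fuel
  induction fuel with
  | zero =>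
    intro hi hfa
    simp only [pvAdvHi]
    exact ⟨le_rfl, fun h => h, fun j h1 h2 => by omega, fun hn _ => absurd hn (by omega)⟩
  | succ fuel ih =>
    intro hi hfa
    simp only [pvAdvHi]
    by_cases hc : hi < n ∧ s.getD hi 0 - x < diff
    · rw [if_pos hc]
      obtain ⟨ih1, ih2, ih3, ih4⟩ := ih (hi + 1) (by omega)
      refine ⟨by omega, fun _ => ih2 (by omega), ?_, ih4⟩
      intro j hj1 hj2
      rcases Nat.eq_or_lt_of_le hj1 with he | he
      · subst he; exact hc.2
      · exact ih3 j (by omega) hj2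
    · rw [if_neg hc]
      exact ⟨le_rfl, fun hn => hn, fun j h1 h2 => by omega, fun hn hc2 => hc ⟨hn, hc2⟩⟩

theorem greedyB_remOf_stop (s : List Int) (mask : List Bool) (lo : Nat) (diff k : Int)
    (fuel : Nat) (res : List Int)
    (hne : ∀ t j, lo ≤ t → t < j → j < s.length →
        mask.getD t false = false → mask.getD j false = false →
        (∀ p, lo ≤ p → p < t → mask.getD p false = true) →
        s.getD j 0 ≠ s.getD t 0 + diff) :
    pvGreedyB diff k fuel (remOf s mask lo) res = res := by
  rcases hrem : remOf s mask lo with _ | ⟨x, rest⟩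
  · exact greedyB_small diff k fuel [] res (by simp)
  · obtain ⟨t, ht1, ht2, ht3, ht4, ht5, ht6⟩ := remOf_head s mask lo x rest hrem
    subst ht4
    rw [ht6]
    apply greedyB_stop
    apply not_mem_remOf
    intro j hj1 hj2 hj3
    exact hne t j ht1 (by omega) hj2 ht3 hj3 ht5

theorem main_eq (s : List Int) (diff k : Int) :
    ∀ (fuel fuelG : Nat) (mask : List Bool) (lo hi : Nat) (res : List Int),
      s.length ≤ hi + fuel →
      (remOf s mask lo).length ≤ fuelG →
      (∀ p q : Nat, p ≤ q → q < s.length → s.getD p 0 ≤ s.getD q 0) →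
      0 < diff →
      mask.length = s.length →
      1 ≤ lo → lo ≤ hi → hi ≤ s.length →
      (∀ j, mask.getD j false = true → 1 ≤ j ∧ j < hi) →
      (∀ j, lo ≤ j → j < hi → mask.getD j false = false →
        s.getD j 0 - s.getD lo 0 < diff) →
      pvMainLoop s diff k s.length fuel mask lo hi res =
        pvGreedyB diff k fuelG (remOf s mask lo) res := by
  intro fuel
  induction fuel with
  | zero =>
    intro fuelG mask lo hi res hfa hfg hmono hd hmask h1 hlohi hhin hM hlt
    simp only [pvMainLoop]
    symm
    apply greedyB_remOf_stop
    intro t j ht htj hjn hmt hmj hhead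
    have hs1 : s.getD lo 0 ≤ s.getD t 0 := hmono lo t ht (by omega)
    have hs2 := hlt j (by omega) (by omega) hmj
    omega
  | succ fuel ih =>
    intro fuelG mask lo hi res hfa hfg hmono hd hmask h1 hlohi hhin hM hlt
    simp only [pvMainLoop]
    by_cases hhi : hi < s.length
    case neg =>
      rw [if_neg hhi]
      symm
      apply greedyB_remOf_stop
      intro t j ht htj hjn hmt hmj hhead
      have hs1 : s.getD lo 0 ≤ s.getD t 0 := hmono lo t ht (by omega)
      have hs2 := hlt j (by omega) (by omega) hmj
      omega
    case pos =>
      rw [if_pos hhi]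
      obtain ⟨hs1, hs2, hs3⟩ := pvSkipLo_spec mask s.length s.length lo (by omega)
      set lo' := pvSkipLo mask s.length s.length lo with hlo'def
      have hlo'hi : lo' ≤ hi := by
        by_contra hc
        have hmk := (hs2 hi (by omega) (by omega)).2
        have := (hM hi hmk).2
        omega
      have hlo'n : lo' < s.length := by omega
      have hmlo' : mask.getD lo' false = false := by
        by_cases hb : mask.getD lo' false = true
        · exact absurd ⟨hlo'n, hb⟩ hs3
        · simpa using hb
      obtain ⟨ha1, ha2, ha3, ha4⟩ := pvAdvHi_spec s diff (s.getD lo' 0) s.length s.length hi (by omega)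
      set hi' := pvAdvHi s diff (s.getD lo' 0) s.length s.length hi with hhi'def
      have hskip : remOf s mask lo = remOf s mask lo' :=
        remOf_skip s mask (lo' - lo) lo lo' rfl (by omega) (fun j hj1 hj2 => (hs2 j hj1 hj2).2)
      have hx : remOf s mask lo' = s.getD lo' 0 :: remOf s mask (lo' + 1) :=
        remOf_unmarked s mask lo' hlo'n hmlo'
      by_cases hbr : hi' = s.length ∨ s.getD hi' 0 - s.getD lo' 0 > diff
      · rw [if_pos hbr]
        symm
        apply greedyB_remOf_stop
        intro t j ht htj hjn hmt hmj hhead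
        have htlo' : t = lo' := by
          rcases Nat.lt_trichotomy t lo' with h | h | h
          · have := (hs2 t ht h).2; rw [hmt] at this; cases this
          · exact h
          · have := hhead lo' (by omega) h; rw [hmlo'] at this; cases this
        subst htlo'
        have hll : s.getD lo 0 ≤ s.getD lo' 0 := hmono lo lo' (by omega) hlo'n
        by_cases hj1 : j < hi
        · have := hlt j (by omega) hj1 hmj
          omega
        · by_cases hj2 : j < hi'
          · have := ha3 j (by omega) hj2
            omega
          · rcases hbr with hb | hb
            · omega
            · have := hmono hi' j (by omega) hjn
              omega
      · rw [if_neg hbr]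
        rw [not_or] at hbr
        obtain ⟨hbn, hble⟩ := hbr
        have hhi'n : hi' < s.length := by
          have := ha2 (by omega); omega
        have hge := ha4 hhi'n
        have heq : s.getD hi' 0 = s.getD lo' 0 + diff := by omega
        have hmhi' : mask.getD hi' false = false := by
          by_cases hb : mask.getD hi' false = true
          · have := (hM hi' hb).2; omega
          · simpa using hb
        have hlo'hi' : lo' < hi' := by
          rcases Nat.eq_or_lt_of_le (le_trans hlo'hi ha1) with he | he
          · exfalso; rw [← he] at heq; omega
          · exact he
        have hll : s.getD lo 0 ≤ s.getD lo' 0 := hmono lo lo' (by omega) hlo'n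
        have hrm : PySem.List.remove? (remOf s mask (lo' + 1)) (s.getD hi' 0) =
            some (remOf s (mask.set hi' true) (lo' + 1)) := by
          apply remove_remOf s mask (hi' - (lo' + 1)) (lo' + 1) hi' rfl (by omega) hhi'n hmask hmhi'
          intro j hj1 hj2 hj3
          by_cases hja : j < hi
          · have := hlt j (by omega) hja hj3
            omega
          · have := ha3 j (by omega) hj2
            omega
        have hlrm := pvRemoveLen hrm
        have hl2 : (remOf s mask lo).length = (remOf s mask (lo' + 1)).length + 1 := by
          rw [hskip, hx, List.length_cons]
        cases fuelG with
        | zero => omega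
        | succ fg =>
          rw [hskip, hx]
          rw [greedyB_step diff k (s.getD lo' 0) fg _ _ res (by rw [← heq]; exact hrm)]
          refine ih fg (mask.set hi' true) (lo' + 1) (hi' + 1) _
            (by omega) (by omega) hmono hd (by rw [List.length_set]; exact hmask)
            (by omega) (by omega) (by omega) ?_ ?_
          · intro j hj
            by_cases hje : j = hi'
            · subst hje; exact ⟨by omega, by omega⟩
            · rw [getD_set_ne' mask hi' j true hje] at hj
              have := hM j hj
              exact ⟨this.1, by omega⟩
          · intro j hj1 hj2 hj3
            have hje : j ≠ hi' := by
              intro he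
              rw [he, getD_set_self' mask hi' (by omega)] at hj3
              cases hj3
            rw [getD_set_ne' mask hi' j true hje] at hj3
            have hl1 : s.getD lo' 0 ≤ s.getD (lo' + 1) 0 := hmono lo' (lo' + 1) (by omega) (by omega)
            by_cases hja : j < hi
            · have := hlt j (by omega) hja hj3
              omega
            · have hji : j < hi' := by omega
              have := ha3 j (by omega) hji
              omega

theorem replicate_getD_false (n j : Nat) : (List.replicate n false).getD j false = false := by
  simp only [List.getD_eq_getElem?_getD, List.getElem?_replicate]
  split <;> rfl

theorem remOf_replicate (s : List Int) : ∀ lo, remOf s (List.replicate s.length false) lo = s.drop lo := by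
  intro lo
  fun_induction remOf s (List.replicate s.length false) lo with
  | case1 lo hlt hm ih =>
    rw [replicate_getD_false] at hm; cases hm
  | case2 lo hlt hm ih =>
    rw [ih, List.getD_eq_getElem s 0 hlt, List.drop_eq_getElem_cons hlt]
  | case3 lo hge =>
    rw [List.drop_eq_nil_of_le (by omega)]

theorem shiftRight_one_int (a : Int) : a >>> (1 : Nat) = PySem.Int.floordiv a 2 := by
  rw [Int.shiftRight_eq_div_pow, PySem.Int.floordiv_eq_ediv_of_pos (by norm_num)]
  norm_num

theorem loopAB (s : List Int)
    (hmono : ∀ p q : Nat, p ≤ q → q < s.length → s.getD p 0 ≤ s.getD q 0) :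
    ∀ (fuel i : Nat), 1 ≤ i → pvLoopA s s.length fuel i = pvLoopB s s.length fuel i := by
  intro fuel
  induction fuel with
  | zero => intro i _; rfl
  | succ fuel IH =>
    intro i h1i
    simp only [pvLoopA, pvLoopB]
    by_cases hin : i < s.length
    · rw [if_pos hin, if_pos hin]
      by_cases hdup : s.getD i 0 = s.getD (i - 1) 0
      · rw [if_pos hdup, if_pos hdup]
        exact IH (i + 1) (by omega)
      · rw [if_neg hdup, if_neg hdup]
        have hii : s.getD (i - 1) 0 ≤ s.getD i 0 := hmono (i - 1) i (by omega) hin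
        have h0i : s.getD 0 0 ≤ s.getD (i - 1) 0 := hmono 0 (i - 1) (by omega) (by omega)
        have hd : 0 < s.getD i 0 - s.getD 0 0 := by
          rcases lt_or_eq_of_le hii with h | h
          · omega
          · exact absurd h.symm hdup
        -- the two parity tests agree: diff & 1 = diff mod 2 ∈ {0,1}
        have hpar : (0 < PySem.Int.band (s.getD i 0 - s.getD 0 0) 1) ↔
            (PySem.Int.mod (s.getD i 0 - s.getD 0 0) 2 ≠ 0) := by
          rw [PySem.Int.band_one]
          have := PySem.Int.mod_nonneg (s.getD i 0 - s.getD 0 0) (by norm_num : (0:Int) < 2)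
          omega
        by_cases hodd : 0 < PySem.Int.band (s.getD i 0 - s.getD 0 0) 1
        · rw [if_pos hodd, if_pos (hpar.mp hodd)]
          exact IH (i + 1) (by omega)
        · rw [if_neg hodd, if_neg (fun hc => hodd (hpar.mpr hc))]
          rw [shiftRight_one_int]
          -- the two matchers produce the same list
          have hmain : pvMainLoop s (s.getD i 0 - s.getD 0 0)
                (PySem.Int.floordiv (s.getD i 0 - s.getD 0 0) 2) s.length s.length
                ((List.replicate s.length false).set i true) 1 (i + 1)
                [s.getD 0 0 + PySem.Int.floordiv (s.getD i 0 - s.getD 0 0) 2] =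
              pvGreedyB (s.getD i 0 - s.getD 0 0)
                (PySem.Int.floordiv (s.getD i 0 - s.getD 0 0) 2) s.length s [] := by
            set diff := s.getD i 0 - s.getD 0 0 with hdiffdef
            set k := PySem.Int.floordiv diff 2 with hkdef
            have hn2 : 2 ≤ s.length := by omega
            obtain ⟨m, hm⟩ : ∃ m, s.length = m + 1 := ⟨s.length - 1, by omega⟩
            -- first step of B's matcher: pair (s[0], s[i])
            have hs0 : s = remOf s (List.replicate s.length false) 0 := (remOf_replicate s 0).symm
            have hstep1 : remOf s (List.replicate s.length false) 0 =
                s.getD 0 0 :: remOf s (List.replicate s.length false) 1 :=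
              remOf_unmarked s _ 0 (by omega) (replicate_getD_false _ 0)
            have hrm1 : PySem.List.remove? (remOf s (List.replicate s.length false) 1)
                (s.getD 0 0 + diff) =
                some (remOf s ((List.replicate s.length false).set i true) 1) := by
              have hv : s.getD 0 0 + diff = s.getD i 0 := by omega
              rw [hv]
              apply remove_remOf s _ (i - 1) 1 i rfl (by omega) hin (by simp)
                (replicate_getD_false _ i)
              intro j hj1 hj2 _
              have hji : s.getD j 0 ≤ s.getD (i - 1) 0 := hmono j (i - 1) (by omega) (by omega)
              omega
            conv_rhs => rw [hm, hs0, hstep1]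
            rw [greedyB_step diff k (s.getD 0 0) m _ _ [] hrm1]
            rw [List.nil_append]
            have hlenB : (remOf s ((List.replicate s.length false).set i true) 1).length ≤ m := by
              have := remOf_length_le s ((List.replicate s.length false).set i true) 1
              omega
            apply main_eq s diff k s.length m
              ((List.replicate s.length false).set i true) 1 (i + 1) _
              (by omega) hlenB hmono hd
              (by rw [List.length_set, List.length_replicate]) le_rfl (by omega) (by omega)
            · intro j hj
              by_cases hje : j = i
              · subst hje; exact ⟨by omega, by omega⟩
              · rw [getD_set_ne' _ i j true hje, replicate_getD_false] at hj; cases hj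
            · intro j hj1 hj2 hj3
              have hje : j ≠ i := by
                intro he
                rw [he, getD_set_self' _ i (by rw [List.length_replicate]; omega)] at hj3
                cases hj3
              have hji : s.getD j 0 ≤ s.getD (i - 1) 0 := hmono j (i - 1) (by omega) (by omega)
              have h01 : s.getD 0 0 ≤ s.getD 1 0 := hmono 0 1 (by omega) (by omega)
              omega
          rw [hmain]
          by_cases hlen : (pvGreedyB (s.getD i 0 - s.getD 0 0)
              (PySem.Int.floordiv (s.getD i 0 - s.getD 0 0) 2) s.length s []).length = s.length / 2
          · rw [if_pos hlen, if_pos hlen]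
          · rw [if_neg hlen, if_neg hlen]
            exact IH (i + 1) (by omega)
    · rw [if_neg hin, if_neg hin]

theorem sorted_getD_mono (nums : List Int) (p q : Nat) (hpq : p ≤ q)
    (hq : q < (PySem.List.sorted nums (fun x => x) false).length) :
    (PySem.List.sorted nums (fun x => x) false).getD p 0 ≤
      (PySem.List.sorted nums (fun x => x) false).getD q 0 := by
  rw [List.getD_eq_getElem _ 0 hq, List.getD_eq_getElem _ 0 (lt_of_le_of_lt hpq hq)]
  exact PySem.List.sorted_id_getElem_mono nums hpq hq

-- ===== VERDICT (by name: the statement is the Claim_ definition above) =====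
theorem recoverArray_spec : Claim_equal_recoverArray := by
  intro nums _ _
  unfold Spec_recoverArray recoverArray recoverArray_alt
  dsimp only []
  exact loopAB (PySem.List.sorted nums (fun x => x) false)
    (sorted_getD_mono nums) (PySem.List.sorted nums (fun x => x) false).length 1 le_rfl
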